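-- pv_equiv track=rewrite | github.com/AudioVisuaali/AudioBot-2 | modules/spongebob.py | spongebob_message
-- ===== SOURCE A (Python) =====
-- def spongebob_message(m):
--     spongebobbed = ""
--     i = True  # capitalize
--     for char in m:
--         if i:
--             spongebobbed += char.upper()
--         else:
--             spongebobbed += char.lower()
--         if char != ' ':
--             i = not i
--     return spongebobbed
-- ===== SOURCE B (Python) =====
-- def spongebob_message(m):
--     # pass 1: per-position parity of the count of non-space chars seen so far
--     parities = []
--     c = 0
--     for ch in m:
--         parities.append(c % 2 == 0)
--         if ch != ' ':
--             c += 1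
--     # pass 2: apply the precomputed case schedule
--     return ''.join(ch.upper() if p else ch.lower() for ch, p in zip(m, parities))
-- ===== Notes on version B (the rewrite author's own statement) =====
-- stated objective: alternative
-- what changed: Replaced the single stateful toggle loop by a two-pass scheme: first build a per-position parity table of the running non-space count, then map each character to upper/lower by its precomputed parity.
import Mathlib
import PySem

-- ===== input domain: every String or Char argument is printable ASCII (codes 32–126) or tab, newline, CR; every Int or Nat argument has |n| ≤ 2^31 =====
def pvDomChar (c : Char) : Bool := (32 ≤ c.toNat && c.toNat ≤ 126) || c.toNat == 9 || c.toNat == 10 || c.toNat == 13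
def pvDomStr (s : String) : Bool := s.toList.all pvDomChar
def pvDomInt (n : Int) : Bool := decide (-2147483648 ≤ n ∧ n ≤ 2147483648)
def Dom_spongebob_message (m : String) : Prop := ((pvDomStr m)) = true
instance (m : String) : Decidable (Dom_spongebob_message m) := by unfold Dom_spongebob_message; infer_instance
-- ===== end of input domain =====

-- B replaces A's single stateful toggle loop by a two-pass scheme (parity table, then apply); alternative decomposition, same cost.


-- ===== PORT A =====
-- literal port: fold over the characters carrying the accumulated string and the toggle flag
def spongebob_message (m : String) : String :=
  let r := m.toList.foldl (fun (st : List Char × Bool) ch =>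
      (st.1 ++ [if st.2 then PySem.Chars.upperChar ch else PySem.Chars.lowerChar ch],
       if ch ≠ ' ' then !st.2 else st.2)) ([], true)
  String.ofList r.1

-- ===== PORT B =====
-- pass 1: per-position parity of the running non-space count
def sbParities : List Char → Nat → List Bool
  | [], _ => []
  | ch :: rest, c => decide (c % 2 = 0) :: sbParities rest (if ch ≠ ' ' then c + 1 else c)

-- pass 2: apply the precomputed case schedule
def spongebob_message_alt (m : String) : String :=
  String.ofList ((m.toList.zip (sbParities m.toList 0)).map
    (fun p => if p.2 then PySem.Chars.upperChar p.1 else PySem.Chars.lowerChar p.1))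

-- ===== PRECONDITION & SPEC =====
def Spec_spongebob_message (m : String) (out : String) : Prop := out = spongebob_message_alt m
instance (m : String) (out : String) : Decidable (Spec_spongebob_message m out) := by unfold Spec_spongebob_message; infer_instance

-- ===== CLAIM (what is proved, stated in full; the proofs are below) =====
def Claim_equal_spongebob_message : Prop := ∀ (m : String), Dom_spongebob_message m → Spec_spongebob_message m (spongebob_message m)

-- ===== LEMMAS AND PROOFS =====
theorem sb_loop_eq (l : List Char) (acc : List Char) (c : Nat) :
    (l.foldl (fun (st : List Char × Bool) ch =>
      (st.1 ++ [if st.2 then PySem.Chars.upperChar ch else PySem.Chars.lowerChar ch],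
       if ch ≠ ' ' then !st.2 else st.2)) (acc, decide (c % 2 = 0))).1
    = acc ++ (l.zip (sbParities l c)).map
        (fun p => if p.2 then PySem.Chars.upperChar p.1 else PySem.Chars.lowerChar p.1) := by
  induction l generalizing acc c with
  | nil => simp
  | cons ch rest ih =>
    simp only [List.foldl_cons, sbParities, List.zip_cons_cons, List.map_cons]
    have hflag : (if ch ≠ ' ' then !decide (c % 2 = 0) else decide (c % 2 = 0))
        = decide ((if ch ≠ ' ' then c + 1 else c) % 2 = 0) := by
      by_cases h : ch = ' '
      · simp [h]
      · simp only [h, ne_eq, not_false_iff, if_true]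
        rcases Nat.mod_two_eq_zero_or_one c with hc | hc <;>
          simp [hc, Nat.add_mod]
    rw [hflag, ih]
    simp

-- ===== VERDICT (by name: the statement is the Claim_ definition above) =====
theorem spongebob_message_spec : Claim_equal_spongebob_message := by
  intro m _
  unfold Spec_spongebob_message spongebob_message spongebob_message_alt
  have h := sb_loop_eq m.toList [] 0
  norm_num at h
  dsimp only
  simp only [ne_eq, ite_not]
  rw [h]
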